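-- pv_equiv track=rewrite | github.com/luigisaetta/workshop_aigen_ita | test_oci_command_r_rag_st.py | highlight_substrings
-- ===== SOURCE A (Python) =====
-- def highlight_substrings(text, delimiters, doc_ids_list):
--     """
--     Evidenzia le sottostringhe in un testo e aggiunge le liste di doc_id tra parentesi quadre.
--
--     Args:
--     - text (str): il testo originale.
--     - delimiters (list of tuples): ogni tupla contiene (start, end).
--     - doc_ids_list (list of lists): lista delle liste di doc_id associati ai delimitatori.
--
--     Returns:
--     - str: il testo con le sottostringhe evidenziate e le liste di doc_id aggiunte.
--     """
--     combined = list(zip(delimiters, doc_ids_list))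
--     combined.sort(key=lambda x: x[0][0], reverse=True)
--
--     for (start, end), doc_ids in combined:
--         original_substring = text[start:end]
--         highlighted_substring = (
--             f'<span style="background-color: green;">{original_substring}</span>'
--         )
--         doc_id_str = f' [{", ".join(doc_ids)}]'
--         text = text[:start] + highlighted_substring + doc_id_str + text[end:]
--
--     return text
-- ===== SOURCE B (Python) =====
-- SPAN_OPEN = '<span style="background-color: green;">'
-- SPAN_CLOSE = '</span>'
--
--
-- def _clamp(n, total):
--     if n < 0:
--         n += total
--     return min(max(n, 0), total)
--
--
-- def _split(pieces, n):
--     # split a piece list at character position n: join(before) == join(pieces)[:n]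
--     before = []
--     i = 0
--     while i < len(pieces) and n >= len(pieces[i]):
--         before.append(pieces[i])
--         n -= len(pieces[i])
--         i += 1
--     if i < len(pieces) and n > 0:
--         before.append(pieces[i][:n])
--         return before, [pieces[i][n:]] + pieces[i + 1:]
--     return before, pieces[i:]
--
--
-- def highlight_substrings(text, delimiters, doc_ids_list):
--     combined = list(zip(delimiters, doc_ids_list))
--     combined.sort(key=lambda x: x[0][0], reverse=True)
--
--     # piece list: the text is the concatenation of the pieces; each edit
--     # splices pieces instead of rebuilding the whole string
--     pieces = [text]
--     for (start, end), doc_ids in combined: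
--         total = sum(len(p) for p in pieces)
--         i = _clamp(start, total)
--         j = _clamp(end, total)
--         before, rest_i = _split(pieces, i)
--         _, after = _split(pieces, j)
--         mid, _ = _split(rest_i, j - i) if j > i else ([], rest_i)
--         sub = "".join(mid)
--         doc_id_str = " [" + ", ".join(doc_ids) + "]"
--         pieces = before + [SPAN_OPEN, sub, SPAN_CLOSE, doc_id_str] + after
--     return "".join(pieces)
-- ===== Notes on version B (the rewrite author's own statement) =====
-- stated objective: faster
-- what changed: B keeps the text as a piece list (flat rope) and splices each highlighted edit into it, joining once at the end, instead of A's rebuilding of the whole string on every iteration.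
import Mathlib
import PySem

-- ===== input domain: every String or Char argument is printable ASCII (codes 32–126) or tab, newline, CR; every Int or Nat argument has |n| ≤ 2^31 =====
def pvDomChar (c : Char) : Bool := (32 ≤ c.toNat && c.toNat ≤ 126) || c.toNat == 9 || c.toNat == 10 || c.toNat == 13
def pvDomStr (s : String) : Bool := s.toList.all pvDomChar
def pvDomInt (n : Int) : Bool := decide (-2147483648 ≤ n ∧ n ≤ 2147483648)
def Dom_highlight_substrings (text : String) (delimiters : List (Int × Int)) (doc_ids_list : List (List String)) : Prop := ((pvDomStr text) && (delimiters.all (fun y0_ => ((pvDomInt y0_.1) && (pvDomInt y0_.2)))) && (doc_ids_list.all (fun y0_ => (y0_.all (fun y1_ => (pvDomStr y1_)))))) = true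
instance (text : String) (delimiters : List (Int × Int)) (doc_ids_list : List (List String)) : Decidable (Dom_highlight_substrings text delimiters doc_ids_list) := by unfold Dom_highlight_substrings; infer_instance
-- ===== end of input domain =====

-- B replaces A's per-edit whole-string rebuilding by splicing a piece list (a flat
-- rope) and joining once at the end; same return value on every input (alternative
-- structure, less copying per edit).

-- constants shared by both Pythons (string literals of the source)
def spanOpen : List Char := "<span style=\"background-color: green;\">".toList
def spanClose : List Char := "</span>".toList
-- f' [{", ".join(doc_ids)}]'
def docChars (ds : List String) : List Char :=
  " [".toList ++ PySem.Chars.join ", ".toList (ds.map String.toList) ++ "]".toList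

-- ===== PORT A =====
-- one iteration of A's loop: text = text[:start] + highlighted + doc_id_str + text[end:]
def hlStepA (t : List Char) (it : (Int × Int) × List String) : List Char :=
  PySem.List.slice t none (some it.1.1)
    ++ (spanOpen ++ PySem.List.slice t (some it.1.1) (some it.1.2) ++ spanClose)
    ++ docChars it.2
    ++ PySem.List.slice t (some it.1.2) none

def highlight_substrings (text : String) (delimiters : List (Int × Int)) (doc_ids_list : List (List String)) : String :=
  String.ofList ((PySem.List.sorted (delimiters.zip doc_ids_list) (fun x => x.1.1) true).foldl hlStepA text.toList)

-- ===== PORT B =====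
-- _clamp(n, total): Python slice-bound clamping
def clampB (n : Int) (total : Nat) : Nat :=
  min (max (if n < 0 then n + total else n) 0).toNat total

-- _split(pieces, n): split the piece list at character position n
def splitPieces (pieces : List (List Char)) (n : Nat) : List (List Char) × List (List Char) :=
  match pieces with
  | [] => ([], [])
  | p :: rest =>
    if p.length ≤ n then
      let pr := splitPieces rest (n - p.length)
      (p :: pr.1, pr.2)
    else if n = 0 then ([], p :: rest)
    else ([p.take n], p.drop n :: rest)

-- one iteration of B's loop: splice the piece list instead of rebuilding the string
def hlStepB (pieces : List (List Char)) (it : (Int × Int) × List String) : List (List Char) :=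
  let total := (pieces.map List.length).sum
  let i := clampB it.1.1 total
  let j := clampB it.1.2 total
  let bi := splitPieces pieces i
  let bj := splitPieces pieces j
  let mid := if i < j then (splitPieces bi.2 (j - i)).1 else []
  let sub := mid.flatten
  bi.1 ++ [spanOpen, sub, spanClose, docChars it.2] ++ bj.2

def highlight_substrings_alt (text : String) (delimiters : List (Int × Int)) (doc_ids_list : List (List String)) : String :=
  String.ofList ((PySem.List.sorted (delimiters.zip doc_ids_list) (fun x => x.1.1) true).foldl hlStepB [text.toList]).flatten

-- ===== PRECONDITION & SPEC =====
def Spec_highlight_substrings (text : String) (delimiters : List (Int × Int)) (doc_ids_list : List (List String)) (out : String) : Prop := out = highlight_substrings_alt text delimiters doc_ids_list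
instance (text : String) (delimiters : List (Int × Int)) (doc_ids_list : List (List String)) (out : String) : Decidable (Spec_highlight_substrings text delimiters doc_ids_list out) := by unfold Spec_highlight_substrings; infer_instance

-- ===== CLAIM (what is proved, stated in full; the proofs are below) =====
def Claim_equal_highlight_substrings : Prop := ∀ (text : String) (delimiters : List (Int × Int)) (doc_ids_list : List (List String)), Dom_highlight_substrings text delimiters doc_ids_list → Spec_highlight_substrings text delimiters doc_ids_list (highlight_substrings text delimiters doc_ids_list)

-- ===== LEMMAS AND PROOFS =====

theorem splitPieces_flatten (pieces : List (List Char)) (n : Nat) :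
    (splitPieces pieces n).1.flatten = pieces.flatten.take n ∧
    (splitPieces pieces n).2.flatten = pieces.flatten.drop n := by
  induction pieces generalizing n with
  | nil => simp [splitPieces]
  | cons p rest ih =>
    by_cases h : p.length ≤ n
    · have hih := ih (n - p.length)
      refine ⟨?_, ?_⟩
      · simp only [splitPieces, if_pos h, List.flatten_cons, hih.1]
        rw [List.take_append, List.take_of_length_le h]
      · simp only [splitPieces, if_pos h, List.flatten_cons, hih.2]
        rw [List.drop_append, List.drop_eq_nil_of_le h]; simp
    · by_cases h0 : n = 0
      · simp only [splitPieces, if_neg h, if_pos h0]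
        simp [h0]
      · refine ⟨?_, ?_⟩
        · simp only [splitPieces, if_neg h, if_neg h0, List.flatten_cons]
          rw [List.take_append, Nat.sub_eq_zero_of_le (by omega)]; simp
        · simp only [splitPieces, if_neg h, if_neg h0, List.flatten_cons]
          rw [List.drop_append, Nat.sub_eq_zero_of_le (by omega)]; simp

theorem clampB_eq (v : Int) (L : Nat) : clampB v L = PySem.List.clampIdx L v := by
  unfold clampB PySem.List.clampIdx
  split_ifs <;> omega

theorem hlStepB_flatten (t : List Char) (pieces : List (List Char)) (it : (Int × Int) × List String)
    (h : pieces.flatten = t) : (hlStepB pieces it).flatten = hlStepA t it := by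
  subst h
  have htot : (pieces.map List.length).sum = pieces.flatten.length :=
    List.length_flatten.symm
  unfold hlStepB hlStepA PySem.List.slice
  simp only [htot, clampB_eq]
  set t := pieces.flatten with ht
  set i := PySem.List.clampIdx t.length it.1.1 with hi
  set j := PySem.List.clampIdx t.length it.1.2 with hj
  have hsp := splitPieces_flatten pieces i
  have hsp2 := splitPieces_flatten pieces j
  have hmidf : (splitPieces pieces i).2.flatten = t.drop i := hsp.2
  have hiL : i ≤ t.length := by simp [hi, PySem.List.clampIdx]; split_ifs <;> omega
  have hjL : j ≤ t.length := by simp [hj, PySem.List.clampIdx]; split_ifs <;> omega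
  have hmid : (if i < j then (splitPieces (splitPieces pieces i).2 (j - i)).1 else ([] : List (List Char))).flatten
      = (t.drop i).take (j - i) := by
    by_cases hij : i < j
    · rw [if_pos hij, (splitPieces_flatten _ _).1, hmidf]
    · rw [if_neg hij]
      have : j - i = 0 := by omega
      simp [this]
  simp only [List.flatten_append, List.flatten_cons, List.flatten_nil, hsp.1, hsp2.2, hmid]
  have hdrop : (t.drop j).take (t.length - j) = t.drop j := by
    apply List.take_of_length_le; simp
  simp [hdrop, List.append_assoc, ← ht]

theorem foldl_hl (l : List ((Int × Int) × List String)) (t : List Char) (pieces : List (List Char))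
    (h : pieces.flatten = t) : (l.foldl hlStepB pieces).flatten = l.foldl hlStepA t := by
  induction l generalizing t pieces with
  | nil => simpa using h
  | cons it rest ih => exact ih _ _ (hlStepB_flatten t pieces it h)

-- ===== VERDICT (by name: the statement is the Claim_ definition above) =====
theorem highlight_substrings_spec : Claim_equal_highlight_substrings := by
  intro text delimiters doc_ids_list _
  unfold Spec_highlight_substrings highlight_substrings highlight_substrings_alt
  rw [foldl_hl _ text.toList [text.toList] (by simp)]
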